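-- pv_equiv track=rewrite | github.com/Gyeongwon-Gim/Algorithm | 백준/Silver/2164. 카드2/카드2.py | solution
-- ===== SOURCE A (Python) =====
-- from collections import deque
--
-- def solution(num_list):
--     num_list = deque(num_list)
--     while len(num_list) > 1:
--         # 맨 위의 카드 버리기
--         num_list.popleft()
--         # 카드 맨 뒤로 보내기
--         if len(num_list) == 1:
--             break
--         else:
--             card = num_list.popleft()
--             num_list.append(card)
--     return num_list[-1]
-- ===== SOURCE B (Python) =====
-- def solution(num_list):
--     n = len(num_list)
--     p = 1
--     while p * 2 <= n:
--         p *= 2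
--     i = n - 1 if p == n else 2 * (n - p) - 1
--     return num_list[i]
-- ===== Notes on version B (the rewrite author's own statement) =====
-- stated objective: faster
-- what changed: Replaces the O(n) deque simulation by the closed-form Josephus-style survivor index (largest power of two <= n computed by doubling), indexing the list directly.
import Mathlib
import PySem

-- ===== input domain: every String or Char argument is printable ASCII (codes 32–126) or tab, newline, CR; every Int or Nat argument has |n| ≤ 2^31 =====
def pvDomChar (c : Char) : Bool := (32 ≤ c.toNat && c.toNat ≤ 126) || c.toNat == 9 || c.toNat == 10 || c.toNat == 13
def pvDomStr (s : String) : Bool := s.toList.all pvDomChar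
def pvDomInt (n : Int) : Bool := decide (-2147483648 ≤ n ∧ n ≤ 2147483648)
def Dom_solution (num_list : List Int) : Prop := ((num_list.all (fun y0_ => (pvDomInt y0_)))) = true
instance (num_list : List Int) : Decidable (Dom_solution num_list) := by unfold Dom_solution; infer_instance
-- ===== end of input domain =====

-- B replaces A's O(n) deque simulation by the closed-form survivor index
-- (largest power of two ≤ n found by doubling) and a single list lookup.

-- ===== PORT A =====
-- the while-loop over the deque: pop front; if one card left stop, else move next card to the back
def solGo (l : List Int) : List Int :=
  if l.length > 1 then
    match l with
    | [] => l
    | _ :: rest =>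
      if rest.length = 1 then rest
      else
        match rest with
        | [] => rest
        | c :: rest2 => solGo (rest2 ++ [c])
  else l
termination_by l.length
decreasing_by simp

def solution (num_list : List Int) : Int :=
  (PySem.List.pyGet? (solGo num_list) (-1)).getD 0

-- ===== PORT B =====
-- while p * 2 <= n: p *= 2   (hp is only a totality guard)
def powLoop (n p : Nat) (hp : 0 < p) : Nat :=
  if p * 2 ≤ n then powLoop n (p * 2) (by omega) else p
termination_by n - p
decreasing_by omega

def solution_alt (num_list : List Int) : Int :=
  let n := num_list.length
  let p := powLoop n 1 Nat.one_pos
  let i : Int := if p = n then (n : Int) - 1 else 2 * ((n : Int) - (p : Int)) - 1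
  (PySem.List.pyGet? num_list i).getD 0

-- ===== PRECONDITION & SPEC =====
-- A raises IndexError on the empty list (num_list[-1]); B does too; excluded.
def Pre_solution (num_list : List Int) : Prop := num_list ≠ []
instance (num_list : List Int) : Decidable (Pre_solution num_list) := by unfold Pre_solution; infer_instance
def pvWitness_solution : List Int := [3, 1, 4, 1, 5]

def Spec_solution (num_list : List Int) (out : Int) : Prop := out = solution_alt num_list
instance (num_list : List Int) (out : Int) : Decidable (Spec_solution num_list out) := by unfold Spec_solution; infer_instance

-- ===== CLAIM (what is proved, stated in full; the proofs are below) =====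
def Claim_equal_solution : Prop := ∀ (num_list : List Int), Dom_solution num_list → Pre_solution num_list → Spec_solution num_list (solution num_list)

-- ===== LEMMAS AND PROOFS =====

-- survivor index of the queue process on a list of length n
def surv : Nat → Nat
  | 0 => 0
  | 1 => 0
  | (n+2) => if surv (n+1) = n then 1 else surv (n+1) + 2

lemma surv_lt : ∀ n, 0 < n → surv n < n := by
  intro n
  induction n with
  | zero => omega
  | succ m ih =>
    intro _
    match m, ih with
    | 0, _ => simp [surv]
    | (k+1), ih =>
      have h := ih (by omega)
      simp only [surv]
      split <;> omega

lemma solGo_eq : ∀ n (l : List Int), l.length = n → 0 < n → solGo l = (l[surv n]?).toList := by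
  intro n
  induction n using Nat.strong_induction_on with
  | _ n ih =>
    intro l hl hn
    match n, l, hl with
    | 1, [a], _ => rw [solGo.eq_def]; simp [surv]
    | (m+2), a :: rest, hl =>
      have hrest : rest.length = m + 1 := by simpa using hl
      rw [solGo.eq_def]
      simp only [List.length_cons, hrest]
      rw [if_pos (by omega)]
      by_cases h1 : m + 1 = 1
      · -- rest has one element
        have hm0 : m = 0 := by omega
        subst hm0
        rw [if_pos rfl]
        obtain ⟨b, rfl⟩ := List.length_eq_one_iff.mp (by simpa using hrest)
        simp [surv]
      · rw [if_neg (by omega)]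
        match rest, hrest with
        | c :: rest2, hrest =>
          have hr2 : rest2.length = m := by simpa using hrest
          have hm : 0 < m := by omega
          show solGo (rest2 ++ [c]) = _
          rw [ih (m+1) (by omega) (rest2 ++ [c]) (by simp [hr2]) (by omega)]
          have hs := surv_lt (m+1) (by omega)
          simp only [surv]
          by_cases hj : surv (m+1) = m
          · rw [if_pos hj, hj]
            rw [List.getElem?_append_right (by omega)]
            simp [hr2]
          · rw [if_neg hj]
            have hjlt : surv (m+1) < m := by omega
            rw [List.getElem?_append_left (by omega)]
            simp [List.getElem?_cons_succ]

lemma powLoop_spec : ∀ n p (hp : 0 < p), (∃ k, p = 2^k) → p ≤ n →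
    (∃ k, powLoop n p hp = 2^k) ∧ powLoop n p hp ≤ n ∧ n < 2 * powLoop n p hp := by
  intro n p hp
  induction p, hp using powLoop.induct (n := n) with
  | case1 p hp h ih =>
    intro hpow hle
    rw [powLoop.eq_def, if_pos h]
    exact ih (by obtain ⟨k, hk⟩ := hpow; exact ⟨k+1, by rw [hk]; ring⟩) (by omega)
  | case2 p hp h =>
    intro hpow hle
    rw [powLoop.eq_def, if_neg h]
    exact ⟨hpow, hle, by omega⟩

lemma pow2_unique {a b n : Nat} (ha1 : 2^a ≤ n) (ha2 : n < 2 * 2^a)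
    (hb1 : 2^b ≤ n) (hb2 : n < 2 * 2^b) : 2^a = 2^b := by
  rcases Nat.lt_trichotomy a b with h | h | h
  · have : 2 * 2^a ≤ 2^b := by
      calc 2 * 2^a = 2^(a+1) := by ring
      _ ≤ 2^b := Nat.pow_le_pow_right (by omega) (by omega)
    omega
  · rw [h]
  · have : 2 * 2^b ≤ 2^a := by
      calc 2 * 2^b = 2^(b+1) := by ring
      _ ≤ 2^a := Nat.pow_le_pow_right (by omega) (by omega)
    omega

lemma surv_step (m p q : Nat) (hm : 0 < m)
    (hkp : ∃ k, p = 2^k) (hp1 : p ≤ m) (hp2 : m < 2 * p)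
    (hkq : ∃ k, q = 2^k) (hq1 : q ≤ m + 1) (hq2 : m + 1 < 2 * q)
    (ihv : surv m = if p = m then m - 1 else 2 * (m - p) - 1) :
    surv (m + 1) = if q = m + 1 then m + 1 - 1 else 2 * (m + 1 - q) - 1 := by
  obtain ⟨kp, hkp⟩ := hkp
  obtain ⟨kq, hkq⟩ := hkq
  have hrec : surv (m + 1) = if surv m = m - 1 then 1 else surv m + 2 := by
    match m, hm with
    | (k+1), _ => simp [surv]
  have hppos : 0 < p := by rw [hkp]; positivity
  by_cases hcase : m + 1 = 2 * p
  · have hq : q = 2 * p := by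
      have h2 : (2:Nat) * 2^kp = 2^(kp+1) := by ring
      have := pow2_unique (a := kq) (b := kp + 1) (n := m + 1)
        (by omega) (by omega) (by rw [← h2]; omega) (by rw [← h2]; omega)
      omega
    by_cases hpm : p = m
    · have hm1 : m = 1 := by omega
      subst hm1
      have hq2' : q = 2 := by omega
      subst hq2'
      decide
    · rw [if_neg hpm] at ihv
      rw [hrec, if_neg (by omega), ihv, if_pos (by omega)]
      omega
  · have hq : q = p := by
      have := pow2_unique (a := kq) (b := kp) (n := m + 1)
        (by omega) (by omega) (by omega) (by omega)
      omega
    by_cases hpm : p = m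
    · rw [if_pos hpm] at ihv
      rw [hrec, if_pos (by omega), if_neg (by omega)]
      omega
    · rw [if_neg hpm] at ihv
      rw [hrec, if_neg (by omega), ihv, if_neg (by omega)]
      omega

lemma surv_closed : ∀ n, 0 < n →
    surv n = if powLoop n 1 Nat.one_pos = n then n - 1 else 2 * (n - powLoop n 1 Nat.one_pos) - 1 := by
  intro n
  induction n with
  | zero => omega
  | succ m ih =>
    intro _
    obtain ⟨hkq, hq1, hq2⟩ := powLoop_spec (m+1) 1 Nat.one_pos ⟨0, rfl⟩ (by omega)
    by_cases hm : m = 0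
    · subst hm
      obtain ⟨kq, hkq⟩ := hkq
      have h1 : (1:Nat) ≤ 2^kq := Nat.one_le_two_pow
      have hq : powLoop (0+1) 1 Nat.one_pos = 1 := by omega
      rw [hq]
      decide
    · have hmpos : 0 < m := by omega
      obtain ⟨hkp, hp1, hp2⟩ := powLoop_spec m 1 Nat.one_pos ⟨0, rfl⟩ (by omega)
      exact surv_step m _ _ hmpos hkp hp1 hp2 hkq hq1 hq2 (ih hmpos)

-- ===== VERDICT (by name: the statement is the Claim_ definition above) =====
theorem solution_spec : Claim_equal_solution := by
  intro l _ hpre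
  unfold Spec_solution solution solution_alt
  have hn : 0 < l.length := List.length_pos_iff.mpr hpre
  obtain ⟨⟨k, hk⟩, hp1, hp2⟩ := powLoop_spec l.length 1 Nat.one_pos ⟨0, rfl⟩ (by omega)
  have hsl := surv_lt l.length hn
  have hsc := surv_closed l.length hn
  rw [solGo_eq l.length l rfl hn]
  have hget : l[surv l.length]? = some (l[surv l.length]'hsl) := List.getElem?_eq_getElem hsl
  have hidx : (if powLoop l.length 1 Nat.one_pos = l.length then (l.length : Int) - 1
      else 2 * ((l.length : Int) - ((powLoop l.length 1 Nat.one_pos : Nat) : Int)) - 1)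
      = ((surv l.length : Nat) : Int) := by
    by_cases hc : powLoop l.length 1 Nat.one_pos = l.length
    · rw [if_pos hc, hsc, if_pos hc]; omega
    · rw [if_neg hc, hsc, if_neg hc]; omega
  rw [hget]
  simp only [Option.toList_some]
  rw [PySem.List.pyGet?_neg_one]
  simp only [List.getLast?_singleton]
  rw [hidx, PySem.List.pyGet?_natCast, hget]
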